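-- pv_equiv track=rewrite | github.com/Visithrand/quantathon | utils/scoring_engine.py | _assess_twister_difficulty
-- ===== SOURCE A (Python) =====
-- def _assess_twister_difficulty(twister: str) -> int:
--     """Assess tongue twister difficulty level"""
--     # Check for common challenging combinations
--     challenging_patterns = ['th', 'sh', 'ch', 'st', 'tr', 'br', 'pr', 'sl', 'sp']
--     difficulty = 1
--
--     for pattern in challenging_patterns:
--         if pattern in twister.lower():
--             difficulty += 0.5
--
--     # Length factor
--     if len(twister.split()) > 8:
--         difficulty += 1
--
--     return min(5, int(difficulty))
-- ===== SOURCE B (Python) =====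
-- _PATTERNS = frozenset(('th', 'sh', 'ch', 'st', 'tr', 'br', 'pr', 'sl', 'sp'))
--
--
-- def _assess_twister_difficulty(twister: str) -> int:
--     """Assess tongue twister difficulty level (streaming single-pass version)."""
--     low = twister.lower()
--     seen = set()
--     for a, b in zip(low, low[1:]):
--         if a + b in _PATTERNS:
--             seen.add(a + b)
--     bonus = 1 if len(twister.split()) > 8 else 0
--     return min(5, 1 + len(seen) // 2 + bonus)
-- ===== Notes on version B (the rewrite author's own statement) =====
-- stated objective: alternative
-- what changed: B makes one streaming pass over the lowered string's adjacent character pairs, collecting the challenging patterns it actually meets into a set, and computes min(5, 1 + len(seen)//2 + bonus) in integer arithmetic; A instead loops over the nine patterns, runs a full substring search of the string for each, and accumulates 0.5 steps in a float that is then truncated.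
import Mathlib
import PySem

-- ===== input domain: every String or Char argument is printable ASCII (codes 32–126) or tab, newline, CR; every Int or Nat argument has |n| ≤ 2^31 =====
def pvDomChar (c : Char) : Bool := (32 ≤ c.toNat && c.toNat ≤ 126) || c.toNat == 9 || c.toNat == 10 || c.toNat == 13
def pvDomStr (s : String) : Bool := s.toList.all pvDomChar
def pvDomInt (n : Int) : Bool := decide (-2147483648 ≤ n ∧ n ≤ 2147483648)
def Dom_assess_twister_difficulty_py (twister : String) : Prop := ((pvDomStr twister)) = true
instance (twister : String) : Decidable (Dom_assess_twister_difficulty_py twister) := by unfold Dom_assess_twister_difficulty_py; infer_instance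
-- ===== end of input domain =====

-- B replaces A's nine full substring searches and float accumulation by ONE streaming pass
-- over adjacent character pairs, collecting met patterns into a set (objective: alternative).

-- ===== PORT A =====
-- A's float `difficulty` is modelled exactly by Rat (all values are multiples of 0.5,
-- exact in binary floating point); Python's int() on these positive values is the floor.
def pvPatterns : List String := ["th", "sh", "ch", "st", "tr", "br", "pr", "sl", "sp"]

def assess_twister_difficulty_py (twister : String) : Int :=
  let difficulty : Rat :=
    pvPatterns.foldl
      (fun d p => if PySem.Str.isIn p (PySem.Str.lower twister) then d + 1/2 else d) 1
  let difficulty : Rat :=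
    if (PySem.Str.split₀ twister).length > 8 then difficulty + 1 else difficulty
  min 5 ⌊difficulty⌋

-- ===== PORT B =====
def pvPatternSet : PySem.Set (List Char) := PySem.Set.ofList (pvPatterns.map String.toList)

def assess_twister_difficulty_py_alt (twister : String) : Int :=
  let low : List Char := PySem.Chars.lower twister.toList
  let seen : PySem.Set (List Char) :=
    (low.zip low.tail).foldl
      (fun s ab =>
        if PySem.Set.contains pvPatternSet [ab.1, ab.2] then PySem.Set.add s [ab.1, ab.2]
        else s)
      PySem.Set.empty
  let bonus : Int := if (PySem.Str.split₀ twister).length > 8 then 1 else 0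
  min 5 (1 + PySem.Int.floordiv (seen.length : Int) 2 + bonus)

-- ===== PRECONDITION & SPEC =====
def Spec_assess_twister_difficulty_py (twister : String) (out : Int) : Prop := out = assess_twister_difficulty_py_alt twister
instance (twister : String) (out : Int) : Decidable (Spec_assess_twister_difficulty_py twister out) := by unfold Spec_assess_twister_difficulty_py; infer_instance

-- ===== CLAIM (what is proved, stated in full; the proofs are below) =====
def Claim_equal_assess_twister_difficulty_py : Prop := ∀ (twister : String), Dom_assess_twister_difficulty_py twister → Spec_assess_twister_difficulty_py twister (assess_twister_difficulty_py twister)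

-- ===== LEMMAS AND PROOFS =====

-- membership in B's fold: exactly the adjacent pairs that are challenging patterns
theorem mem_foldl_condadd (l : List (Char × Char)) (s : PySem.Set (List Char)) (y : List Char) :
    (y ∈ l.foldl
        (fun s ab =>
          if PySem.Set.contains pvPatternSet [ab.1, ab.2] then PySem.Set.add s [ab.1, ab.2]
          else s) s) ↔
      y ∈ s ∨ ∃ ab ∈ l, PySem.Set.contains pvPatternSet [ab.1, ab.2] = true ∧ y = [ab.1, ab.2] := by
  induction l generalizing s with
  | nil => simp
  | cons ab t ih =>
    simp only [List.foldl_cons]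
    by_cases h : PySem.Set.contains pvPatternSet [ab.1, ab.2] = true
    · rw [if_pos h, ih]
      simp only [PySem.Set.mem_add, List.mem_cons]
      constructor
      · rintro ((hy | hy) | ⟨cd, hcd, hc, rfl⟩)
        · exact Or.inl hy
        · exact Or.inr ⟨ab, Or.inl rfl, h, hy⟩
        · exact Or.inr ⟨cd, Or.inr hcd, hc, rfl⟩
      · rintro (hy | ⟨cd, (rfl | hcd), hc, rfl⟩)
        · exact Or.inl (Or.inl hy)
        · exact Or.inl (Or.inr rfl)
        · exact Or.inr ⟨cd, hcd, hc, rfl⟩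
    · rw [if_neg h, ih]
      simp only [List.mem_cons]
      constructor
      · rintro (hy | ⟨cd, hcd, hc, rfl⟩)
        · exact Or.inl hy
        · exact Or.inr ⟨cd, Or.inr hcd, hc, rfl⟩
      · rintro (hy | ⟨cd, (rfl | hcd), hc, rfl⟩)
        · exact Or.inl hy
        · exact absurd hc h
        · exact Or.inr ⟨cd, hcd, hc, rfl⟩

theorem nodup_foldl_condadd (l : List (Char × Char)) (s : PySem.Set (List Char)) (hs : s.Nodup) :
    (l.foldl
        (fun s ab =>
          if PySem.Set.contains pvPatternSet [ab.1, ab.2] then PySem.Set.add s [ab.1, ab.2]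
          else s) s).Nodup := by
  induction l generalizing s with
  | nil => exact hs
  | cons ab t ih =>
    simp only [List.foldl_cons]
    split
    · exact ih _ (PySem.Set.nodup_add _ _ hs)
    · exact ih _ hs

-- a two-character substring occurs iff it is an adjacent pair
theorem infix_pair_iff_mem_zip (a b : Char) (l : List Char) :
    [a, b] <:+: l ↔ (a, b) ∈ l.zip l.tail := by
  induction l with
  | nil => simp
  | cons c t ih =>
    rw [List.infix_cons_iff, ih]
    cases t with
    | nil =>
      simp only [List.tail_nil, List.tail_cons, List.zip_nil_right,
        List.not_mem_nil, or_false, iff_false]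
      intro hp
      simpa using hp.length_le
    | cons d r =>
      simp only [List.tail_cons, List.zip_cons_cons, List.mem_cons, List.cons_prefix_cons,
        List.nil_prefix, and_true, Prod.mk.injEq]

theorem isIn_pair_iff (a b : Char) (l : List Char) :
    PySem.Chars.isIn [a, b] l = true ↔ [a, b] ∈ (l.zip l.tail).map (fun ab => [ab.1, ab.2]) := by
  rw [PySem.Chars.isIn_iff_infix, infix_pair_iff_mem_zip]
  simp only [List.mem_map]
  constructor
  · intro h; exact ⟨(a, b), h, rfl⟩
  · rintro ⟨⟨c, d⟩, hm, he⟩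
    injection he with h1 h2
    injection h2 with h2 h3
    subst h1; subst h2; exact hm

theorem foldl_half_count (c : String → Bool) (l : List String) (a : Rat) :
    l.foldl (fun d p => if c p then d + 1/2 else d) a = a + (l.countP c : Rat) / 2 := by
  induction l generalizing a with
  | nil => simp
  | cons x xs ih =>
    simp only [List.foldl_cons, List.countP_cons, ih]
    by_cases h : c x = true
    · simp [h]; push_cast; ring
    · simp [h]

theorem floor_half_one (k : Nat) (hk : k ≤ 9) :
    ⌊(1 : Rat) + (k : Rat) / 2 + 1⌋ = 1 + (k : Int) / 2 + 1 := by
  interval_cases k <;> norm_num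

theorem floor_half_zero (k : Nat) (hk : k ≤ 9) :
    ⌊(1 : Rat) + (k : Rat) / 2⌋ = 1 + (k : Int) / 2 := by
  interval_cases k <;> norm_num

-- the size of B's seen-set equals A's count of matching patterns
theorem seen_length_eq (low : List Char) :
    ((low.zip low.tail).foldl
        (fun s ab =>
          if PySem.Set.contains pvPatternSet [ab.1, ab.2] then PySem.Set.add s [ab.1, ab.2]
          else s) PySem.Set.empty).length =
      pvPatterns.countP (fun p => PySem.Chars.isIn p.toList low) := by
  set bigs := (low.zip low.tail).map (fun ab => [ab.1, ab.2]) with hbigs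
  set seen := (low.zip low.tail).foldl
      (fun s ab =>
        if PySem.Set.contains pvPatternSet [ab.1, ab.2] then PySem.Set.add s [ab.1, ab.2]
        else s) PySem.Set.empty with hseen
  set filt := (pvPatterns.map String.toList).filter (fun p => decide (p ∈ bigs)) with hfilt
  have hmem : ∀ y, y ∈ seen ↔ y ∈ filt := by
    intro y
    rw [hseen, mem_foldl_condadd]
    rw [hfilt, List.mem_filter]
    simp only [PySem.Set.empty, List.not_mem_nil, false_or, decide_eq_true_eq]
    constructor
    · rintro ⟨ab, hab, hc, rfl⟩
      refine ⟨?_, List.mem_map.mpr ⟨ab, hab, rfl⟩⟩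
      rw [PySem.Set.contains_iff, pvPatternSet, PySem.Set.mem_ofList] at hc
      exact hc
    · rintro ⟨hpat, hbig⟩
      rcases List.mem_map.mp hbig with ⟨ab, hab, rfl⟩
      refine ⟨ab, hab, ?_, rfl⟩
      rw [PySem.Set.contains_iff, pvPatternSet, PySem.Set.mem_ofList]
      exact hpat
  have hnods : seen.Nodup := nodup_foldl_condadd _ _ (by simp [PySem.Set.empty])
  have hnodf : filt.Nodup := List.Nodup.filter _ (by decide)
  have hperm : seen.Perm filt := (List.perm_ext_iff_of_nodup hnods hnodf).mpr hmem
  have hlen : seen.length = filt.length := hperm.length_eq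
  rw [hlen, hfilt, ← List.countP_eq_length_filter, List.countP_map]
  apply List.countP_congr
  intro p hp
  have h2 : ∃ a b, p.toList = [a, b] := by fin_cases hp <;> exact ⟨_, _, rfl⟩
  rcases h2 with ⟨a, b, hab⟩
  simp only [Function.comp_apply, hab, decide_eq_true_eq]
  exact (isIn_pair_iff a b low).symm

-- ===== VERDICT (by name: the statement is the Claim_ definition above) =====
theorem assess_twister_difficulty_py_spec : Claim_equal_assess_twister_difficulty_py := by
  intro twister _
  unfold Spec_assess_twister_difficulty_py assess_twister_difficulty_py assess_twister_difficulty_py_alt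
  simp only
  set low : List Char := PySem.Chars.lower twister.toList with hlow
  have hci : ∀ p, PySem.Str.isIn p (PySem.Str.lower twister) = PySem.Chars.isIn p.toList low := by
    intro p; simp [PySem.Str.isIn, PySem.Str.lower, hlow]
  rw [foldl_half_count, seen_length_eq low]
  have hcount : pvPatterns.countP (fun p => PySem.Str.isIn p (PySem.Str.lower twister))
      = pvPatterns.countP (fun p => PySem.Chars.isIn p.toList low) :=
    List.countP_congr (fun p _ => by rw [hci p])
  rw [hcount]
  set k := pvPatterns.countP (fun p => PySem.Chars.isIn p.toList low) with hk
  have hk9 : k ≤ 9 := by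
    calc k ≤ pvPatterns.length := List.countP_le_length
    _ = 9 := by decide
  rw [PySem.Int.floordiv_eq_ediv_of_pos (by norm_num)]
  by_cases hs : (PySem.Str.split₀ twister).length > 8
  · simp only [hs, if_pos]
    rw [floor_half_one k hk9]
  · simp only [hs, if_false]
    rw [floor_half_zero k hk9]
    omega
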